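-- pv_equiv track=rewrite | github.com/csoneira/DATAFLOW_v3 | MASTER/STAGES/STAGE_1/EVENT_DATA/STEP_1/TASK_5/script_5_fit_to_post.py | _iter_task5_channel_relation_pairs
-- ===== SOURCE A (Python) =====
-- from typing import Dict, Iterable, List, Optional, Tuple, Union
--
-- def _task5_channel_order_key(channel_key: tuple[int, str, int]) -> tuple[int, int, int]:
--     plane, side, strip = channel_key
--     return (plane, 0 if side == "F" else 1, strip)
--
-- def _task5_channel_relation_type(
--     channel_a: tuple[int, str, int],
--     channel_b: tuple[int, str, int],
-- ) -> str:
--     if channel_a == channel_b: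
--         return "self"
--     if channel_a[0] == channel_b[0] and channel_a[2] == channel_b[2]:
--         return "same_strip"
--     if channel_a[0] == channel_b[0]:
--         return "same_plane"
--     return "any"
--
-- def _iter_task5_channel_relation_pairs(
--     channel_map: dict[tuple[int, str, int], dict[str, str]],
-- ) -> Iterable[tuple[tuple[int, str, int], tuple[int, str, int], str]]:
--     ordered_channels = sorted(channel_map, key=_task5_channel_order_key)
--     for idx, channel_a in enumerate(ordered_channels):
--         yield channel_a, channel_a, "self"
--         for channel_b in ordered_channels[idx + 1 :]:
--             yield channel_a, channel_b, _task5_channel_relation_type(channel_a, channel_b)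
-- ===== SOURCE B (Python) =====
-- from itertools import groupby
-- from typing import Iterable
--
--
-- def _iter_task5_channel_relation_pairs(
--     channel_map: dict[tuple[int, str, int], dict[str, str]],
-- ) -> Iterable[tuple[tuple[int, str, int], tuple[int, str, int], str]]:
--     # Group the sorted channels by plane: inside a plane group the label is
--     # decided by the strip alone, and every pair across groups is "any",
--     # so no per-pair relation-type classification is needed.
--     ordered = sorted(channel_map, key=lambda c: (c[0], c[1] != "F", c[2]))
--     groups = [list(g) for _, g in groupby(ordered, key=lambda c: c[0])]
--     for gi, group in enumerate(groups):
--         tail_any = [c for later in groups[gi + 1:] for c in later]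
--         for i, a in enumerate(group):
--             yield a, a, "self"
--             for b in group[i + 1:]:
--                 yield a, b, "same_strip" if a[2] == b[2] else "same_plane"
--             for b in tail_any:
--                 yield a, b, "any"
-- ===== Notes on version B (the rewrite author's own statement) =====
-- stated objective: alternative
-- what changed: B groups the sorted channels by plane with itertools.groupby and emits, per channel, the self pair, the rest of its plane group labelled by a strip-only test, and all channels of later groups as a blanket 'any' block, eliminating the per-pair _task5_channel_relation_type classification and its plane comparisons.
import Mathlib
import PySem

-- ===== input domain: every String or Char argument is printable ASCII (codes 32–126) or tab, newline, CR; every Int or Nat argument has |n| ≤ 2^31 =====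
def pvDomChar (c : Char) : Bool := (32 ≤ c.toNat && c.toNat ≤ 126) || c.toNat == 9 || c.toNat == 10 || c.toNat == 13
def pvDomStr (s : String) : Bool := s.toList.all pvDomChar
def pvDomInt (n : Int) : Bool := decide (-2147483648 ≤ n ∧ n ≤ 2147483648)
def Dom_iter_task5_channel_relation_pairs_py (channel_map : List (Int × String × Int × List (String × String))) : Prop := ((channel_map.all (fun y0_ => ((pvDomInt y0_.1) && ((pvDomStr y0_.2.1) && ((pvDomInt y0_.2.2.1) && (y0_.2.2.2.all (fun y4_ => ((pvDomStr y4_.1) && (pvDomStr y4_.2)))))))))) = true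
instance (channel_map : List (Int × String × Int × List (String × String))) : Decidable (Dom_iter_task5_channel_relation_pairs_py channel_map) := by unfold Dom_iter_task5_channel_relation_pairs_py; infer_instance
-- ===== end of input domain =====

-- B groups the sorted channels by plane and labels same-plane pairs by a strip-only
-- test and cross-plane pairs wholesale as "any", dropping the per-pair relation-type
-- classification (alternative decomposition, same asymptotic cost).

-- ===== PORT A =====
-- module helper _task5_channel_relation_type, used by A
def task5RelType (a b : Int × String × Int) : String :=
  if a = b then "self"
  else if a.1 = b.1 ∧ a.2.2 = b.2.2 then "same_strip"
  else if a.1 = b.1 then "same_plane"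
  else "any"

-- sorted(channel_map, key=_task5_channel_order_key): iterating the dict gives its
-- distinct keys in insertion order (PySem.List.dedup); the tuple key
-- (plane, 0 if side=="F" else 1, strip) is encoded exactly for sorted2 as the pair
-- (2*plane + sidebit, strip), which has the same lexicographic order.
def task5Ordered (channel_map : List (Int × String × Int × List (String × String))) :
    List (Int × String × Int) :=
  PySem.List.sorted2 (PySem.List.dedup (channel_map.map (fun x => (x.1, x.2.1, x.2.2.1))))
    (fun c => 2 * c.1 + (if c.2.1 = "F" then 0 else 1)) (fun c => c.2.2)

def iter_task5_channel_relation_pairs_py (channel_map : List (Int × String × Int × List (String × String))) : List ((Int × String × Int) × (Int × String × Int) × String) :=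
  let ordered := task5Ordered channel_map
  (PySem.List.enumerate ordered).flatMap (fun p =>
    (p.2, p.2, "self") ::
      (PySem.List.slice ordered (some (p.1 + 1)) none).map (fun b => (p.2, b, task5RelType p.2 b)))

-- ===== PORT B =====
-- sorted(channel_map, key=lambda c: (c[0], c[1] != "F", c[2])): same dedup of the dict
-- keys; the (plane, bool, strip) tuple key is encoded for sorted2 as
-- (2*plane + bool, strip), same lexicographic order.
def bOrdered (channel_map : List (Int × String × Int × List (String × String))) :
    List (Int × String × Int) :=
  PySem.List.sorted2 (PySem.List.dedup (channel_map.map (fun x => (x.1, x.2.1, x.2.2.1))))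
    (fun c => 2 * c.1 + (if c.2.1 ≠ "F" then 1 else 0)) (fun c => c.2.2)

-- [list(g) for _, g in groupby(ordered, key=lambda c: c[0])] : maximal runs of equal plane
def groupPlanes : List (Int × String × Int) → List (List (Int × String × Int))
  | [] => []
  | x :: xs =>
    (x :: xs.takeWhile (fun c => c.1 == x.1)) :: groupPlanes (xs.dropWhile (fun c => c.1 == x.1))
  termination_by L => L.length
  decreasing_by exact Nat.lt_succ_of_le (List.length_dropWhile_le _ _)

def iter_task5_channel_relation_pairs_py_alt (channel_map : List (Int × String × Int × List (String × String))) : List ((Int × String × Int) × (Int × String × Int) × String) :=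
  let groups := groupPlanes (bOrdered channel_map)
  (PySem.List.enumerate groups).flatMap (fun gp =>
    let tailAny := (PySem.List.slice groups (some (gp.1 + 1)) none).flatten
    (PySem.List.enumerate gp.2).flatMap (fun ia =>
      (ia.2, ia.2, "self") ::
        ((PySem.List.slice gp.2 (some (ia.1 + 1)) none).map
            (fun b => (ia.2, b, if ia.2.2.2 = b.2.2 then "same_strip" else "same_plane"))
          ++ tailAny.map (fun b => (ia.2, b, "any")))))

-- ===== PRECONDITION & SPEC =====
def Spec_iter_task5_channel_relation_pairs_py (channel_map : List (Int × String × Int × List (String × String))) (out : List ((Int × String × Int) × (Int × String × Int) × String)) : Prop := out = iter_task5_channel_relation_pairs_py_alt channel_map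
instance (channel_map : List (Int × String × Int × List (String × String))) (out : List ((Int × String × Int) × (Int × String × Int) × String)) : Decidable (Spec_iter_task5_channel_relation_pairs_py channel_map out) := by unfold Spec_iter_task5_channel_relation_pairs_py; infer_instance

-- ===== CLAIM (what is proved, stated in full; the proofs are below) =====
def Claim_equal_iter_task5_channel_relation_pairs_py : Prop := ∀ (channel_map : List (Int × String × Int × List (String × String))), Dom_iter_task5_channel_relation_pairs_py channel_map → Spec_iter_task5_channel_relation_pairs_py channel_map (iter_task5_channel_relation_pairs_py channel_map)

-- ===== LEMMAS AND PROOFS =====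

-- the common recursion scheme behind "enumerate + slice from idx+1"
def recF {α β : Type} (f : α → List α → List β) : List α → List β
  | [] => []
  | x :: xs => f x xs ++ recF f xs

theorem enumFlat {α β : Type} (f : α → List α → List β) (suf pre : List α) :
    (PySem.List.enumerate suf (pre.length : Int)).flatMap
      (fun p => f p.2 (PySem.List.slice (pre ++ suf) (some (p.1 + 1)) none)) = recF f suf := by
  induction suf generalizing pre with
  | nil => simp [PySem.List.enumerate, recF]
  | cons x xs ih =>
    have hs : ((pre.length : Int) + 1) = ((pre ++ [x]).length : Int) := by simp
    rw [PySem.List.enumerate_cons]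
    simp only [List.flatMap_cons, hs]
    have hdrop : PySem.List.slice (pre ++ x :: xs) (some ((pre ++ [x]).length : Int)) none = xs := by
      rw [PySem.List.slice_from_natCast]
      have : pre ++ x :: xs = (pre ++ [x]) ++ xs := by simp
      rw [this, List.drop_left]
    have htail := ih (pre ++ [x])
    have hre : pre ++ x :: xs = (pre ++ [x]) ++ xs := by simp
    rw [hdrop, hre, htail]
    simp [recF]

-- A's loop body and B's loop bodies as named functions
def fA (x : Int × String × Int) (xs : List (Int × String × Int)) :
    List ((Int × String × Int) × (Int × String × Int) × String) :=
  (x, x, "self") :: xs.map (fun b => (x, b, task5RelType x b))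

def innerF (t : List (Int × String × Int)) (a : Int × String × Int)
    (rest : List (Int × String × Int)) :
    List ((Int × String × Int) × (Int × String × Int) × String) :=
  (a, a, "self") ::
    (rest.map (fun b => (a, b, if a.2.2 = b.2.2 then "same_strip" else "same_plane"))
      ++ t.map (fun b => (a, b, "any")))

theorem portA_eq (cm : List (Int × String × Int × List (String × String))) :
    iter_task5_channel_relation_pairs_py cm = recF fA (task5Ordered cm) := by
  have h := enumFlat fA (task5Ordered cm) []
  simpa [iter_task5_channel_relation_pairs_py, fA] using h

theorem portB_eq (cm : List (Int × String × Int × List (String × String))) :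
    iter_task5_channel_relation_pairs_py_alt cm
      = recF (fun g later => recF (innerF later.flatten) g) (groupPlanes (bOrdered cm)) := by
  have ho := enumFlat
    (fun (g : List (Int × String × Int)) (later : List (List (Int × String × Int))) =>
      (PySem.List.enumerate g).flatMap (fun ia =>
        (ia.2, ia.2, "self") ::
          ((PySem.List.slice g (some (ia.1 + 1)) none).map
              (fun b => (ia.2, b, if ia.2.2.2 = b.2.2 then "same_strip" else "same_plane"))
            ++ later.flatten.map (fun b => (ia.2, b, "any")))))
    (groupPlanes (bOrdered cm)) []
  have hfun : (fun (g : List (Int × String × Int)) (later : List (List (Int × String × Int))) =>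
      (PySem.List.enumerate g).flatMap (fun ia =>
        (ia.2, ia.2, "self") ::
          ((PySem.List.slice g (some (ia.1 + 1)) none).map
              (fun b => (ia.2, b, if ia.2.2.2 = b.2.2 then "same_strip" else "same_plane"))
            ++ later.flatten.map (fun b => (ia.2, b, "any")))))
      = (fun g later => recF (innerF later.flatten) g) := by
    funext g later
    have h := enumFlat (innerF later.flatten) g []
    simpa [innerF] using h
  rw [hfun] at ho
  simpa [iter_task5_channel_relation_pairs_py_alt] using ho

theorem flatten_groupPlanes : ∀ (L : List (Int × String × Int)), (groupPlanes L).flatten = L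
  | [] => by simp [groupPlanes]
  | x :: xs => by
    rw [groupPlanes]
    simp only [List.flatten_cons]
    rw [flatten_groupPlanes (xs.dropWhile (fun c => c.1 == x.1))]
    simp [List.takeWhile_append_dropWhile]
  termination_by L => L.length
  decreasing_by exact Nat.lt_succ_of_le (List.length_dropWhile_le _ _)

theorem drop_plane_gt (x : Int × String × Int) :
    ∀ (xs : List (Int × String × Int)), xs.Pairwise (fun a b => a.1 ≤ b.1) →
      (∀ y ∈ xs, x.1 ≤ y.1) →
      ∀ b ∈ xs.dropWhile (fun c => c.1 == x.1), x.1 < b.1 := by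
  intro xs
  induction xs with
  | nil => simp
  | cons y ys ih =>
    intro hp hb
    rw [List.dropWhile_cons]
    split
    · exact ih (List.Pairwise.sublist (List.sublist_cons_self y ys) hp)
        (fun z hz => hb z (List.mem_cons_of_mem y hz))
    · rename_i hfalse
      intro b hbmem
      have hyne : y.1 ≠ x.1 := by simpa using hfalse
      have hxy : x.1 < y.1 := lt_of_le_of_ne (hb y (List.mem_cons_self)) (Ne.symm hyne)
      rcases List.mem_cons.1 hbmem with rfl | hmem
      · exact hxy
      · have := (List.pairwise_cons.1 hp).1 b hmem
        omega

theorem recA_split (p : Int) :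
    ∀ (g rest : List (Int × String × Int)),
      (∀ a ∈ g, a.1 = p) → (∀ b ∈ rest, b.1 ≠ p) → (g ++ rest).Nodup →
      recF fA (g ++ rest) = recF (innerF rest) g ++ recF fA rest := by
  intro g
  induction g with
  | nil => simp [recF]
  | cons a as ih =>
    intro rest hg hr hnd
    have hnotmem : a ∉ as ++ rest := (List.nodup_cons.1 (by simpa using hnd)).1
    have hbody : fA a (as ++ rest) = innerF rest a as := by
      unfold fA innerF
      rw [List.map_append]
      congr 1
      congr 1
      · apply List.map_congr_left
        intro b hb
        have hab : a ≠ b := fun h => hnotmem (h ▸ List.mem_append_left rest hb)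
        have hap : a.1 = p := hg a List.mem_cons_self
        have hbp : b.1 = p := hg b (List.mem_cons_of_mem a hb)
        simp only [task5RelType, if_neg hab, hap, hbp]
        by_cases hst : a.2.2 = b.2.2 <;> simp [hst]
      · apply List.map_congr_left
        intro b hb
        have hap : a.1 = p := hg a List.mem_cons_self
        have hbp : b.1 ≠ p := hr b hb
        have hplane : a.1 ≠ b.1 := by rw [hap]; exact fun h => hbp h.symm
        have hab : a ≠ b := fun h => hplane (h ▸ rfl)
        simp [task5RelType, hab, hplane]
    have htail := ih rest (fun a' ha' => hg a' (List.mem_cons_of_mem a ha'))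
      hr (by simpa using (List.nodup_cons.1 (by simpa using hnd)).2)
    calc recF fA ((a :: as) ++ rest)
        = fA a (as ++ rest) ++ recF fA (as ++ rest) := by rw [List.cons_append]; rfl
      _ = innerF rest a as ++ (recF (innerF rest) as ++ recF fA rest) := by rw [hbody, htail]
      _ = (innerF rest a as ++ recF (innerF rest) as) ++ recF fA rest := by rw [List.append_assoc]
      _ = recF (innerF rest) (a :: as) ++ recF fA rest := rfl

theorem grouped_eq : ∀ (L : List (Int × String × Int)),
    L.Pairwise (fun a b => a.1 ≤ b.1) → L.Nodup →
    recF (fun g later => recF (innerF later.flatten) g) (groupPlanes L) = recF fA L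
  | [] => by intro _ _; simp [groupPlanes, recF]
  | x :: xs => by
    intro hp hnd
    have hxs : xs.takeWhile (fun c => c.1 == x.1) ++ xs.dropWhile (fun c => c.1 == x.1) = xs :=
      List.takeWhile_append_dropWhile
    have hrest_sub : (xs.dropWhile (fun c => c.1 == x.1)).Sublist (x :: xs) :=
      (List.dropWhile_sublist _).trans (List.sublist_cons_self x xs)
    have h1 : ∀ a ∈ x :: xs.takeWhile (fun c => c.1 == x.1), a.1 = x.1 := by
      intro a ha
      rcases List.mem_cons.1 ha with rfl | hmem
      · rfl
      · simpa using List.mem_takeWhile_imp hmem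
    have h2 : ∀ b ∈ xs.dropWhile (fun c => c.1 == x.1), b.1 ≠ x.1 := by
      intro b hb
      have := drop_plane_gt x xs (List.Pairwise.sublist (List.sublist_cons_self x xs) hp)
        (fun y hy => (List.pairwise_cons.1 hp).1 y hy) b hb
      omega
    have hnd' : ((x :: xs.takeWhile (fun c => c.1 == x.1)) ++ xs.dropWhile (fun c => c.1 == x.1)).Nodup := by
      rw [List.cons_append, hxs]; exact hnd
    have hsplit := recA_split x.1 (x :: xs.takeWhile (fun c => c.1 == x.1))
      (xs.dropWhile (fun c => c.1 == x.1)) h1 h2 hnd'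
    have hih := grouped_eq (xs.dropWhile (fun c => c.1 == x.1))
      (List.Pairwise.sublist hrest_sub hp) (List.Nodup.sublist hrest_sub hnd)
    rw [groupPlanes]
    calc recF (fun g later => recF (innerF later.flatten) g)
          ((x :: xs.takeWhile (fun c => c.1 == x.1)) :: groupPlanes (xs.dropWhile (fun c => c.1 == x.1)))
        = recF (innerF (groupPlanes (xs.dropWhile (fun c => c.1 == x.1))).flatten)
            (x :: xs.takeWhile (fun c => c.1 == x.1))
          ++ recF (fun g later => recF (innerF later.flatten) g)
            (groupPlanes (xs.dropWhile (fun c => c.1 == x.1))) := rfl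
      _ = recF (innerF (xs.dropWhile (fun c => c.1 == x.1))) (x :: xs.takeWhile (fun c => c.1 == x.1))
          ++ recF fA (xs.dropWhile (fun c => c.1 == x.1)) := by
            rw [flatten_groupPlanes, hih]
      _ = recF fA ((x :: xs.takeWhile (fun c => c.1 == x.1)) ++ xs.dropWhile (fun c => c.1 == x.1)) :=
            hsplit.symm
      _ = recF fA (x :: xs) := by rw [List.cons_append, hxs]
  termination_by L => L.length
  decreasing_by exact Nat.lt_succ_of_le (List.length_dropWhile_le _ _)

-- sorted2 with Int component keys is PySem.List.sorted with the lexicographic key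
theorem sorted2_eq_sorted_lex (xs : List (Int × String × Int))
    (k1 k2 : (Int × String × Int) → Int) :
    PySem.List.sorted2 xs k1 k2 = PySem.List.sorted xs (fun c => toLex (k1 c, k2 c)) := by
  rw [PySem.List.sorted_eq_foldl_insertBy]
  have hbef : (fun (a b : Int × String × Int) =>
      decide (k1 a < k1 b) || (!decide (k1 b < k1 a) && decide (k2 a < k2 b)))
      = (fun a b => decide (toLex (k1 a, k2 a) < toLex (k1 b, k2 b))) := by
    funext a b
    have h : (toLex (k1 a, k2 a) < toLex (k1 b, k2 b)) ↔
        (k1 a < k1 b ∨ (k1 a = k1 b ∧ k2 a < k2 b)) := Prod.Lex.lt_iff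
    by_cases h1 : k1 a < k1 b <;> by_cases h2 : k1 b < k1 a <;> by_cases h3 : k2 a < k2 b <;>
      simp [h, h1, h2, h3] <;> omega
  change List.foldl (fun acc x => PySem.List.insertBy
    (fun a b => decide (k1 a < k1 b) || (!decide (k1 b < k1 a) && decide (k2 a < k2 b))) x acc) [] xs = _
  rw [hbef]

theorem ordered_plane_pairwise (cm : List (Int × String × Int × List (String × String))) :
    (task5Ordered cm).Pairwise (fun a b => a.1 ≤ b.1) := by
  unfold task5Ordered
  rw [sorted2_eq_sorted_lex]
  have hp := PySem.List.sorted_pairwise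
    (PySem.List.dedup (cm.map (fun x => (x.1, x.2.1, x.2.2.1))))
    (fun c => toLex (2 * c.1 + (if c.2.1 = "F" then 0 else 1), c.2.2))
  apply hp.imp
  intro a b h
  have hle := Prod.Lex.le_iff.1 h
  have hba : (if a.2.1 = "F" then (0:Int) else 1) = 0 ∨ (if a.2.1 = "F" then (0:Int) else 1) = 1 := by
    split <;> simp
  have hbb : (if b.2.1 = "F" then (0:Int) else 1) = 0 ∨ (if b.2.1 = "F" then (0:Int) else 1) = 1 := by
    split <;> simp
  simp only [ofLex_toLex] at hle
  rcases hle with hlt | ⟨heq, _⟩ <;> omega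

theorem ordered_nodup (cm : List (Int × String × Int × List (String × String))) :
    (task5Ordered cm).Nodup := by
  unfold task5Ordered
  exact (PySem.List.sorted2_perm _ _ _ _).symm.nodup
    (PySem.List.nodup_dedup _)

theorem bOrdered_eq (cm : List (Int × String × Int × List (String × String))) :
    bOrdered cm = task5Ordered cm := by
  unfold bOrdered task5Ordered
  have hk : (fun (c : Int × String × Int) => 2 * c.1 + (if c.2.1 ≠ "F" then (1:Int) else 0))
      = (fun c => 2 * c.1 + (if c.2.1 = "F" then (0:Int) else 1)) := by
    funext c
    by_cases h : c.2.1 = "F" <;> simp [h]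
  rw [hk]

-- ===== VERDICT (by name: the statement is the Claim_ definition above) =====
theorem iter_task5_channel_relation_pairs_py_spec : Claim_equal_iter_task5_channel_relation_pairs_py := by
  intro cm _
  unfold Spec_iter_task5_channel_relation_pairs_py
  rw [portA_eq, portB_eq, bOrdered_eq]
  exact (grouped_eq (task5Ordered cm) (ordered_plane_pairwise cm) (ordered_nodup cm)).symm
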